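-- pv_equiv track=rewrite | github.com/Arsen1302/Code-copy-detector | TestData/solutions/problem_1442_3.py | solution_1442_3
-- ===== SOURCE A (Python) =====
-- from typing import List
--
-- def solution_1442_3(plants: List[int], capacityA: int, capacityB: int) -> int:
--     alice,bob = 0,len(plants)-1
--     result,capacity_A,capacity_B = 0,capacityA,capacityB
--     while alice < bob:
--         if capacity_A < plants[alice]:
--             capacity_A = capacityA
--             result += 1
--         capacity_A -= plants[alice]
--         if capacity_B < plants[bob]:
--             capacity_B = capacityB
--             result += 1
--         capacity_B -= plants[bob]
--         alice += 1
--         bob -= 1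
--     if alice == bob:
--         max_capacity = max(capacity_A,capacity_B)
--         if max_capacity < plants[alice]: result += 1
--     return result
-- ===== SOURCE B (Python) =====
-- from typing import List
--
-- def _water(ps: List[int], cap: int):
--     """One gardener waters ps in order from a full tank.
--     Processes the list run by run: an inner scan extends the current tank over
--     the longest run whose cumulative use stays within cap, then one refill is
--     charged for the plant that broke the run. Returns (refills, water_left)."""
--     refills = 0
--     used = 0
--     i, n = 0, len(ps)
--     while i < n:
--         while i < n and used + ps[i] <= cap:
--             used += ps[i]
--             i += 1
--         if i < n:
--             refills += 1
--             used = ps[i]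
--             i += 1
--     return refills, cap - used
--
-- def solution_1442_3(plants: List[int], capacityA: int, capacityB: int) -> int:
--     n = len(plants)
--     k = n // 2
--     ra, leftA = _water(plants[:k], capacityA)
--     rb, leftB = _water(plants[n - k:][::-1], capacityB)
--     result = ra + rb
--     if n % 2 == 1 and max(leftA, leftB) < plants[k]:
--         result += 1
--     return result
-- ===== Notes on version B (the rewrite author's own statement) =====
-- stated objective: alternative
-- what changed: Replaces A's interleaved two-pointer per-plant refill simulation (tracking each gardener's remaining water every step) with a shared run-based greedy helper: an inner scan jumps over the longest run of plants whose cumulative usage fits one tank, charging one refill per broken run, applied to the front half and the reversed back half, plus a middle-plant check.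
import Mathlib
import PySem

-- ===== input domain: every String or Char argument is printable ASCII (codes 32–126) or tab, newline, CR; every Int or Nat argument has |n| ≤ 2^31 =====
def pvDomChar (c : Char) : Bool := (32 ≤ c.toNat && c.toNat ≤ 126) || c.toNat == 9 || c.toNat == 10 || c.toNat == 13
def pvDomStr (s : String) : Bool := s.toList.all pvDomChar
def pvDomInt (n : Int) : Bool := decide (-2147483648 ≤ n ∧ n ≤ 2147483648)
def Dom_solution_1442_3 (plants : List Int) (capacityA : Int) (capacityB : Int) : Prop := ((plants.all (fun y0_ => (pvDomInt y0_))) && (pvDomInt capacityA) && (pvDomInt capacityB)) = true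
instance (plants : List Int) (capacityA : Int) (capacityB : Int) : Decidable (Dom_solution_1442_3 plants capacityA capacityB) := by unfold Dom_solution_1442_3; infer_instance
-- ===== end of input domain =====

-- B replaces A's interleaved two-pointer per-plant refill simulation with a run-based greedy
-- helper (inner scan over the longest run fitting one tank, one refill per broken run) applied
-- to the front half and the reversed back half (objective: alternative, same cost).

-- ===== PORT A =====
-- the while loop of A: state (alice, bob, capacity_A, capacity_B, result)
def loopA (plants : List Int) (cA0 cB0 : Int) (alice bob capA capB res : Int) : Int :=
  if h : alice < bob then
    let pa := PySem.List.pyGetD plants alice 0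
    let res1 := if capA < pa then res + 1 else res
    let capA1 := (if capA < pa then cA0 else capA) - pa
    let pb := PySem.List.pyGetD plants bob 0
    let res2 := if capB < pb then res1 + 1 else res1
    let capB1 := (if capB < pb then cB0 else capB) - pb
    loopA plants cA0 cB0 (alice + 1) (bob - 1) capA1 capB1 res2
  else if alice = bob then
    let p := PySem.List.pyGetD plants alice 0
    if max capA capB < p then res + 1 else res
  else res
termination_by (bob - alice).toNat
decreasing_by omega

def solution_1442_3 (plants : List Int) (capacityA : Int) (capacityB : Int) : Int :=
  loopA plants capacityA capacityB 0 ((plants.length : Int) - 1) capacityA capacityB 0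

-- ===== PORT B =====
-- the inner while of _water: extend the current tank over the longest run whose
-- cumulative usage stays within cap; returns (index after the run, water used)
def innerW (ps : List Int) (cap : Int) (i : Nat) (used : Int) : Nat × Int :=
  if h : i < ps.length then
    if used + ps[i] ≤ cap then innerW ps cap (i + 1) (used + ps[i]) else (i, used)
  else (i, used)
termination_by ps.length - i

-- the inner scan never moves the index backwards (termination lemma for outerW)
theorem innerW_ge (ps : List Int) (cap : Int) (i : Nat) (used : Int) : i ≤ (innerW ps cap i used).1 := by
  fun_induction innerW with
  | case1 i used h hle ih => omega
  | case2 i used h hle => simp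
  | case3 i used h => simp

-- the outer while of _water: one refill per broken run
def outerW (ps : List Int) (cap : Int) (i : Nat) (used refills : Int) : Int × Int :=
  if hi : i < ps.length then
    let r := innerW ps cap i used
    if h : r.1 < ps.length then
      outerW ps cap (r.1 + 1) (ps[r.1]) (refills + 1)
    else (refills, cap - r.2)
  else (refills, cap - used)
termination_by ps.length - i
decreasing_by
  have := innerW_ge ps cap i used
  omega

def solution_1442_3_alt (plants : List Int) (capacityA : Int) (capacityB : Int) : Int :=
  let n := plants.length
  let k := n / 2
  let a := outerW (PySem.List.slice plants none (some (k : Int))) capacityA 0 0 0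
  let b := outerW ((PySem.List.slice plants (some ((n : Int) - (k : Int))) none).reverse) capacityB 0 0 0
  let result := a.1 + b.1
  if n % 2 = 1 ∧ max a.2 b.2 < PySem.List.pyGetD plants (k : Int) 0 then result + 1 else result

-- ===== PRECONDITION & SPEC =====
def Spec_solution_1442_3 (plants : List Int) (capacityA : Int) (capacityB : Int) (out : Int) : Prop := out = solution_1442_3_alt plants capacityA capacityB
instance (plants : List Int) (capacityA : Int) (capacityB : Int) (out : Int) : Decidable (Spec_solution_1442_3 plants capacityA capacityB out) := by unfold Spec_solution_1442_3; infer_instance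

-- ===== CLAIM (what is proved, stated in full; the proofs are below) =====
def Claim_equal_solution_1442_3 : Prop := ∀ (plants : List Int) (capacityA : Int) (capacityB : Int), Dom_solution_1442_3 plants capacityA capacityB → Spec_solution_1442_3 plants capacityA capacityB (solution_1442_3 plants capacityA capacityB)

-- ===== LEMMAS AND PROOFS =====

-- one watering step of a single gardener (proof-internal reference semantics): state (remaining, count)
def stepW (cap0 : Int) (st : Int × Int) (p : Int) : Int × Int :=
  if st.1 < p then (cap0 - p, st.2 + 1) else (st.1 - p, st.2)

-- separated-sweeps value of A's loop on the segment [a, b] (proof helper)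
def rhsSep (plants : List Int) (cA0 cB0 : Int) (a b : Nat) (capA capB res : Int) : Int :=
  let k := (b + 1 - a) / 2
  let fr := ((plants.drop a).take k).foldl (stepW cA0) (capA, res)
  let bk := (((plants.drop (b + 1 - k)).take k).reverse).foldl (stepW cB0) (capB, fr.2)
  if (b - a) % 2 = 0 then (if max fr.1 bk.1 < plants.getD (a + k) 0 then bk.2 + 1 else bk.2) else bk.2

-- counter additivity: the count component is an offset, the cap component ignores it
theorem fold_stepW_add (c0 : Int) (l : List Int) : ∀ (cap r s : Int),
    l.foldl (stepW c0) (cap, r + s) =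
      ((l.foldl (stepW c0) (cap, r)).1, (l.foldl (stepW c0) (cap, r)).2 + s) := by
  induction l with
  | nil => intro cap r s; simp
  | cons p t ih =>
    intro cap r s
    simp only [List.foldl_cons, stepW]
    split_ifs with h
    · rw [show r + s + 1 = (r + 1) + s by ring]; exact ih _ _ _
    · exact ih _ _ _

theorem loopA_eq_rhsSep (plants : List Int) (cA0 cB0 : Int) :
    ∀ (m a b : Nat) (capA capB res : Int), a + m = b → b < plants.length →
      loopA plants cA0 cB0 (a : Int) (b : Int) capA capB res = rhsSep plants cA0 cB0 a b capA capB res := by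
  intro m
  induction m using Nat.strong_induction_on with
  | _ m ih =>
    intro a b capA capB res hab hb
    match m, hab with
    | 0, hab =>
      have hba : (a : Int) = (b : Int) := by omega
      rw [loopA]
      simp only [show ¬((a : Int) < (b : Int)) by omega, dite_false, if_pos hba, rhsSep]
      have hk : (b + 1 - a) / 2 = 0 := by omega
      have hm : (b - a) % 2 = 0 := by omega
      simp [hk, hm, PySem.List.pyGetD_natCast, show a + 0 = a by omega]
    | 1, hab =>
      have hlt : (a : Int) < (b : Int) := by omega
      rw [loopA]
      simp only [dif_pos hlt]
      rw [loopA]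
      have h1 : ¬((a : Int) + 1 < (b : Int) - 1) := by omega
      have h2 : ¬((a : Int) + 1 = (b : Int) - 1) := by omega
      simp only [dif_neg h1, if_neg h2]
      have hk : (b + 1 - a) / 2 = 1 := by omega
      have hm : ¬ (b - a) % 2 = 0 := by omega
      have hda : plants.drop a = plants.getD a 0 :: plants.drop (a + 1) := by
        rw [List.drop_eq_getElem_cons (by omega : a < plants.length),
          List.getD_eq_getElem plants 0 (by omega)]
      have hdb : plants.drop b = plants.getD b 0 :: plants.drop (b + 1) := by
        rw [List.drop_eq_getElem_cons (by omega : b < plants.length),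
          List.getD_eq_getElem plants 0 (by omega)]
      have hga : PySem.List.pyGetD plants (a : Int) 0 = plants.getD a 0 :=
        PySem.List.pyGetD_natCast plants a 0
      have hgb : PySem.List.pyGetD plants (b : Int) 0 = plants.getD b 0 :=
        PySem.List.pyGetD_natCast plants b 0
      simp only [rhsSep, hk, if_neg hm, hda, show b + 1 - 1 = b by omega, hdb,
        List.take_succ_cons, List.take_zero, List.reverse_cons, List.reverse_nil,
        List.nil_append, List.foldl_cons, List.foldl_nil, hga, hgb, stepW]
      split_ifs <;> rfl
    | (m' + 2), hab =>
      have hlt : (a : Int) < (b : Int) := by omega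
      rw [loopA]
      simp only [dif_pos hlt]
      have hga : PySem.List.pyGetD plants (a : Int) 0 = plants.getD a 0 :=
        PySem.List.pyGetD_natCast plants a 0
      have hgb : PySem.List.pyGetD plants (b : Int) 0 = plants.getD b 0 :=
        PySem.List.pyGetD_natCast plants b 0
      have hcast1 : (a : Int) + 1 = ((a + 1 : Nat) : Int) := by push_cast; ring
      have hcast2 : (b : Int) - 1 = ((b - 1 : Nat) : Int) := by omega
      rw [hga, hgb, hcast1, hcast2,
        ih m' (by omega) (a + 1) (b - 1) _ _ _ (by omega) (by omega)]
      have hk : (b + 1 - a) / 2 = (b - 1 + 1 - (a + 1)) / 2 + 1 := by omega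
      set k' := (b - 1 + 1 - (a + 1)) / 2 with hk'
      have hfront : (plants.drop a).take (k' + 1) = plants.getD a 0 :: ((plants.drop (a + 1)).take k') := by
        rw [List.drop_eq_getElem_cons (by omega : a < plants.length),
          List.getD_eq_getElem plants 0 (by omega), List.take_succ_cons]
      have hback : (plants.drop (b + 1 - (k' + 1))).take (k' + 1)
          = ((plants.drop (b - 1 + 1 - k')).take k') ++ [plants.getD b 0] := by
        have h1 : b + 1 - (k' + 1) = b - k' := by omega
        have h2 : b - 1 + 1 - k' = b - k' := by omega
        rw [h1, h2, List.take_add_one, List.getElem?_drop,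
          show b - k' + k' = b by omega, List.getElem?_eq_getElem (by omega : b < plants.length),
          List.getD_eq_getElem plants 0 (by omega)]
        rfl
      simp only [rhsSep, hk, ← hk', hfront, hback, List.reverse_append, List.reverse_cons,
        List.reverse_nil, List.nil_append, List.foldl_cons, List.singleton_append]
      set pa := plants.getD a 0 with hpa
      set pb := plants.getD b 0 with hpb
      set capA1 := (if capA < pa then cA0 else capA) - pa with hca1
      set capB1 := (if capB < pb then cB0 else capB) - pb with hcb1
      set da : Int := if capA < pa then 1 else 0 with hda
      set db : Int := if capB < pb then 1 else 0 with hdb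
      have hres2 : (if capB < pb then (if capA < pa then res + 1 else res) + 1 else (if capA < pa then res + 1 else res)) = res + da + db := by
        simp only [hda, hdb]; split_ifs <;> ring
      have hstepA : stepW cA0 (capA, res) pa = (capA1, res + da) := by
        simp only [stepW, hca1, hda]; split_ifs <;> simp
      rw [hres2, hstepA,
        show res + da + db = (res + da) + db by ring, fold_stepW_add]
      set F := ((plants.drop (a + 1)).take k').foldl (stepW cA0) (capA1, res + da) with hF
      have hstepB : stepW cB0 (capB, F.2) pb = (capB1, F.2 + db) := by
        simp only [stepW, hcb1, hdb]; split_ifs <;> simp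
      rw [hstepB]
      have hmid : (b - 1 - (a + 1)) % 2 = (b - a) % 2 := by omega
      have hidx : a + 1 + k' = a + (k' + 1) := by omega
      rw [hmid, hidx]

-- the inner scan moves the fold forward without touching the count
theorem innerW_fold (ps : List Int) (cap : Int) (i : Nat) (used r : Int) :
    (ps.drop i).foldl (stepW cap) (cap - used, r)
      = (ps.drop (innerW ps cap i used).1).foldl (stepW cap) (cap - (innerW ps cap i used).2, r) := by
  fun_induction innerW with
  | case1 i used h hle ih =>
    rw [List.drop_eq_getElem_cons h, List.foldl_cons]
    have hst : stepW cap (cap - used, r) ps[i] = (cap - (used + ps[i]), r) := by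
      simp only [stepW, if_neg (by omega : ¬ cap - used < ps[i])]
      rw [show cap - used - ps[i] = cap - (used + ps[i]) from by ring]
    rw [hst, ih]
  | case2 i used h hle => rfl
  | case3 i used h => rfl

-- the inner scan stops only at the end or at a plant the current tank cannot cover
theorem innerW_stop (ps : List Int) (cap : Int) (i : Nat) (used : Int) :
    ∀ _ : (innerW ps cap i used).1 < ps.length,
      cap < (innerW ps cap i used).2 + ps[(innerW ps cap i used).1]'(by assumption) := by
  fun_induction innerW with
  | case1 i used h hle ih => exact ih
  | case2 i used h hle => intro _; change cap < used + ps[i]; omega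
  | case3 i used h => intro hlt; exact absurd hlt (by simpa using h)

-- the run-based outer loop computes exactly the per-plant fold's (count, remaining)
theorem outerW_eq_fold (ps : List Int) (cap : Int) (i : Nat) (used refills : Int) :
    outerW ps cap i used refills
      = (((ps.drop i).foldl (stepW cap) (cap - used, refills)).2,
         ((ps.drop i).foldl (stepW cap) (cap - used, refills)).1) := by
  fun_induction outerW with
  | case1 i used refills hi r hr ih =>
    have hr' : (innerW ps cap i used).1 < ps.length := hr
    rw [innerW_fold ps cap i used refills]
    rw [List.drop_eq_getElem_cons hr', List.foldl_cons]
    have hlt : cap - (innerW ps cap i used).2 < ps[(innerW ps cap i used).1] := by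
      have := innerW_stop ps cap i used hr'; omega
    have hst : stepW cap (cap - (innerW ps cap i used).2, refills) ps[(innerW ps cap i used).1]
        = (cap - ps[(innerW ps cap i used).1], refills + 1) := by
      simp only [stepW, if_pos hlt]
    rw [hst]; exact ih
  | case2 i used refills hi r hr =>
    have hr' : ¬ (innerW ps cap i used).1 < ps.length := hr
    rw [innerW_fold ps cap i used refills,
      List.drop_eq_nil_of_le (by omega : ps.length ≤ (innerW ps cap i used).1)]
    rfl
  | case3 i used refills hi =>
    rw [List.drop_eq_nil_of_le (by omega : ps.length ≤ i)]
    rfl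

theorem take_drop_half (plants : List Int) (k : Nat) (hk : k ≤ plants.length) :
    (plants.drop (plants.length - k)).take k = plants.drop (plants.length - k) := by
  apply List.take_of_length_le
  simp [List.length_drop]; omega

theorem solution_1442_3_eq_alt (plants : List Int) (capacityA capacityB : Int) :
    solution_1442_3 plants capacityA capacityB = solution_1442_3_alt plants capacityA capacityB := by
  rcases plants with _ | ⟨p, t⟩
  · simp [solution_1442_3, solution_1442_3_alt, loopA, outerW, PySem.List.slice]
  · set plants := p :: t with hpl
    have hn : 1 ≤ plants.length := by simp [hpl]
    set n := plants.length with hnn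
    have hcast : (n : Int) - 1 = ((n - 1 : Nat) : Int) := by omega
    unfold solution_1442_3
    have h := loopA_eq_rhsSep plants capacityA capacityB (n - 1) 0 (n - 1)
      capacityA capacityB 0 (by omega) (by omega)
    rw [Nat.cast_zero] at h
    rw [hcast, h]
    unfold rhsSep solution_1442_3_alt
    have hsl1 : PySem.List.slice plants none (some ((n / 2 : Nat) : Int)) = plants.take (n / 2) :=
      PySem.List.slice_to_natCast plants (n / 2)
    have hsl2 : PySem.List.slice plants (some ((n : Int) - ((n / 2 : Nat) : Int))) none
        = plants.drop (n - n / 2) := by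
      rw [show (n : Int) - ((n / 2 : Nat) : Int) = ((n - n / 2 : Nat) : Int) by omega,
        PySem.List.slice_from_natCast]
    have htd : (plants.drop (n - n / 2)).take (n / 2) = plants.drop (n - n / 2) := by
      rw [hnn]; exact take_drop_half plants (n / 2) (by omega)
    have ho1 := outerW_eq_fold (plants.take (n / 2)) capacityA 0 0 0
    have ho2 := outerW_eq_fold ((plants.drop (n - n / 2)).reverse) capacityB 0 0 0
    simp only [List.drop_zero, sub_zero] at ho1 ho2
    set F := (plants.take (n / 2)).foldl (stepW capacityA) (capacityA, 0) with hF
    set G := ((plants.drop (n - n / 2)).reverse).foldl (stepW capacityB) (capacityB, 0) with hG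
    have hbk : ((plants.drop (n - n / 2)).reverse).foldl (stepW capacityB) (capacityB, F.2)
        = (G.1, G.2 + F.2) := by
      have h0 : ((capacityB, F.2) : Int × Int) = (capacityB, (0 : Int) + F.2) := by simp
      rw [h0, fold_stepW_add, ← hG]
    simp only [show (n - 1 + 1 - 0) / 2 = n / 2 by omega, show n - 1 + 1 - n / 2 = n - n / 2 by omega,
      List.drop_zero, hsl1, hsl2, htd, ho1, ho2, ← hF, hbk,
      PySem.List.pyGetD_natCast, show 0 + n / 2 = n / 2 by omega, ← hnn]
    have hpar : ((n - 1 - 0) % 2 = 0) = (n % 2 = 1) := by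
      apply propext; omega
    simp only [hpar]
    by_cases hm : n % 2 = 1
    · by_cases hmax : max F.1 G.1 < plants.getD (n / 2) 0
      · simp only [if_pos hm, if_pos hmax, if_pos (And.intro hm hmax)]; ring
      · simp only [if_pos hm, if_neg hmax, if_neg (fun hc : n % 2 = 1 ∧ max F.1 G.1 < plants.getD (n / 2) 0 => hmax hc.2)]; ring
    · simp only [if_neg hm, if_neg (fun hc : n % 2 = 1 ∧ _ => hm hc.1)]; ring

-- ===== VERDICT (by name: the statement is the Claim_ definition above) =====
theorem solution_1442_3_spec : Claim_equal_solution_1442_3 := by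
  intro plants capacityA capacityB _
  exact solution_1442_3_eq_alt plants capacityA capacityB
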